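-- pv_equiv track=rewrite | github.com/SyedMahboobAli/Leetcode | Blind75/Graphs/200. Number of Islands.py | countEnclosedWaterBodies
-- ===== SOURCE A (Python) =====
-- from typing import List
--
-- def countEnclosedWaterBodies(grid: List[List[str]]) -> int:
--     if not grid:
--         return 0
--
--     n, m = len(grid), len(grid[0])
--     directions = [(1,0), (-1,0), (0,1), (0,-1)]
--
--     def dfs(r, c, target, mark):
--         if r < 0 or c < 0 or r >= n or c >= m or grid[r][c] != target:
--             return
--         grid[r][c] = mark
--         for dr, dc in directions:
--             dfs(r + dr, c + dc, target, mark)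
--
--     # Step 1: Mark all ocean water (connected to borders)
--     for i in range(n):
--         if grid[i][0] == '0':
--             dfs(i, 0, '0', '#')
--         if grid[i][m-1] == '0':
--             dfs(i, m-1, '0', '#')
--     for j in range(m):
--         if grid[0][j] == '0':
--             dfs(0, j, '0', '#')
--         if grid[n-1][j] == '0':
--             dfs(n-1, j, '0', '#')
--
--     # Step 2: Count enclosed water regions
--     count = 0
--     for i in range(n):
--         for j in range(m):
--             if grid[i][j] == '0':  # unvisited enclosed water
--                 count += 1
--                 dfs(i, j, '0', 'W')  # mark as visited water
--
--     return count
-- ===== SOURCE B (Python) =====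
-- # Iterative (explicit-stack) flood fill instead of recursive DFS; border and
-- # count scans iterate over flattened coordinate lists instead of nested index
-- # loops.  Mutates grid in place exactly like the original ('#' then 'W' marks).
-- def countEnclosedWaterBodies(grid):
--     if not grid:
--         return 0
--     n, m = len(grid), len(grid[0])
--
--     def flood(r0, c0, target, mark):
--         stack = [(r0, c0)]
--         while stack:
--             r, c = stack.pop()
--             if r < 0 or c < 0 or r >= n or c >= m or grid[r][c] != target:
--                 continue
--             grid[r][c] = mark
--             # push in reverse neighbour order so the LIFO pop follows the
--             # same visiting order as the recursive version
--             for dr, dc in ((0, -1), (0, 1), (-1, 0), (1, 0)):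
--                 stack.append((r + dr, c + dc))
--
--     border = [(i, j) for i in range(n) for j in (0, m - 1)] \
--            + [(i, j) for j in range(m) for i in (0, n - 1)]
--     for r, c in border:
--         if grid[r][c] == '0':
--             flood(r, c, '0', '#')
--
--     count = 0
--     for r, c in [(i, j) for i in range(n) for j in range(m)]:
--         if grid[r][c] == '0':
--             count += 1
--             flood(r, c, '0', 'W')
--     return count
-- ===== Notes on version B (the rewrite author's own statement) =====
-- stated objective: alternative
-- what changed: The recursive DFS flood fill is replaced by an explicit-stack iterative flood fill, and the border scan and counting scan iterate over flattened coordinate lists instead of nested index loops.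
import Mathlib
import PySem

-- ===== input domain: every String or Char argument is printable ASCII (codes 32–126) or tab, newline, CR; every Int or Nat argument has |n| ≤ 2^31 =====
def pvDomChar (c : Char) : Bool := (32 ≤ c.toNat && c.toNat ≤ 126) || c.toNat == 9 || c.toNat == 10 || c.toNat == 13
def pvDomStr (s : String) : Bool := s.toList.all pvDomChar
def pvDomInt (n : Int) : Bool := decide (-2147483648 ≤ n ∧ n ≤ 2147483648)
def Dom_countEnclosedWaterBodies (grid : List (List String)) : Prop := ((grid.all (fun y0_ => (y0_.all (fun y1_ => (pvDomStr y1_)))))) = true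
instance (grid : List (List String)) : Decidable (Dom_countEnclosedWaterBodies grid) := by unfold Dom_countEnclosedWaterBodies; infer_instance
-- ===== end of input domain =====

-- B replaces the recursive DFS flood fill by an explicit-stack iterative one and
-- scans flattened coordinate lists instead of nested index loops; both Pythons
-- mutate the grid in place identically ('#' then 'W'), the theorems are about the
-- return value.  Indexing is by total `getD`, exact on Pre_ (all indices in range).

-- ===== PORT A =====
-- grid[r][c] read (both Pythons only read in-range cells on Pre_)
def pvCell (g : List (List String)) (r c : Nat) : String :=
  (g.getD r []).getD c ""

-- grid[r][c] = v
def pvSet (g : List (List String)) (r c : Nat) (v : String) : List (List String) :=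
  g.set r ((g.getD r []).set c v)

-- total number of cells; `fuel = pvTot g + 1` bounds the recursion depth of dfs
-- (each productive level removes one target cell), so the fuel guard never fires
def pvTot (g : List (List String)) : Nat := (g.map List.length).sum

-- the recursive dfs of A, fuel-guarded to be total (the guard is unreachable
-- from dfsTop); neighbours in A's direction order (1,0),(-1,0),(0,1),(0,-1)
def dfsA (n m : Nat) (t mk : String) : Nat → List (List String) → Int → Int → List (List String)
  | 0, g, _, _ => g
  | f+1, g, r, c =>
    if r < 0 ∨ c < 0 ∨ (n : Int) ≤ r ∨ (m : Int) ≤ c ∨ pvCell g r.toNat c.toNat ≠ t then g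
    else
      dfsA n m t mk f
        (dfsA n m t mk f
          (dfsA n m t mk f
            (dfsA n m t mk f (pvSet g r.toNat c.toNat mk) (r+1) c)
            (r-1) c)
          r (c+1))
        r (c-1)

def dfsTop (n m : Nat) (g : List (List String)) (r c : Int) (t mk : String) : List (List String) :=
  dfsA n m t mk (pvTot g + 1) g r c

def countEnclosedWaterBodies (grid : List (List String)) : Int :=
  if grid = [] then 0
  else
    let n := grid.length
    let m := (grid.headD []).length
    -- Step 1: mark ocean water
    let g1 := (List.range n).foldl (fun g i =>
      let ga := if pvCell g i 0 = "0" then dfsTop n m g (i : Int) 0 "0" "#" else g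
      if pvCell ga i (m-1) = "0" then dfsTop n m ga (i : Int) ((m : Int) - 1) "0" "#" else ga) grid
    let g2 := (List.range m).foldl (fun g j =>
      let ga := if pvCell g 0 j = "0" then dfsTop n m g 0 (j : Int) "0" "#" else g
      if pvCell ga (n-1) j = "0" then dfsTop n m ga ((n : Int) - 1) (j : Int) "0" "#" else ga) g1
    -- Step 2: count enclosed water regions
    let p := (List.range n).foldl (fun (s : Int × List (List String)) i =>
      (List.range m).foldl (fun s j =>
        if pvCell s.2 i j = "0" then (s.1 + 1, dfsTop n m s.2 (i : Int) (j : Int) "0" "W") else s) s)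
      (0, g2)
    p.1

-- ===== PORT B =====
-- the explicit-stack flood fill of B: head of the list = top of the stack;
-- B's Python pushes the four neighbours in reverse order and pops LIFO,
-- so (r+1,c) is processed first.  Fuel-guarded to be total (guard unreachable
-- from floodB: every iteration pops one entry and pushes 4 only when a cell is marked)
def stackLoop (n m : Nat) (t mk : String) : Nat → List (List String) → List (Int × Int) → List (List String)
  | _, g, [] => g
  | 0, g, _ :: _ => g
  | f+1, g, (r, c) :: rest =>
    if r < 0 ∨ c < 0 ∨ (n : Int) ≤ r ∨ (m : Int) ≤ c ∨ pvCell g r.toNat c.toNat ≠ t then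
      stackLoop n m t mk f g rest
    else
      stackLoop n m t mk f (pvSet g r.toNat c.toNat mk)
        ((r+1, c) :: (r-1, c) :: (r, c+1) :: (r, c-1) :: rest)

def floodB (n m : Nat) (g : List (List String)) (r c : Int) (t mk : String) : List (List String) :=
  stackLoop n m t mk (4 * pvTot g + 4) g [(r, c)]

def countEnclosedWaterBodies_alt (grid : List (List String)) : Int :=
  if grid = [] then 0
  else
    let n := grid.length
    let m := (grid.headD []).length
    let border := ((List.range n).flatMap (fun i => [(i, 0), (i, m - 1)])) ++
                  ((List.range m).flatMap (fun j => [(0, j), (n - 1, j)]))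
    let g1 := border.foldl (fun g p =>
      if pvCell g p.1 p.2 = "0" then floodB n m g (p.1 : Int) (p.2 : Int) "0" "#" else g) grid
    let cells := (List.range n).flatMap (fun i => (List.range m).map (fun j => (i, j)))
    let p := cells.foldl (fun (s : Int × List (List String)) q =>
      if pvCell s.2 q.1 q.2 = "0" then (s.1 + 1, floodB n m s.2 (q.1 : Int) (q.2 : Int) "0" "W") else s)
      (0, g1)
    p.1

-- ===== PRECONDITION & SPEC =====
-- Pre_ is exactly where the Python A returns: on a nonempty grid whose first row
-- is empty, or with some row shorter than the first, A's border scan raises IndexError.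
def Pre_countEnclosedWaterBodies (grid : List (List String)) : Prop :=
  grid = [] ∨ (0 < (grid.headD []).length ∧ ∀ row ∈ grid, (grid.headD []).length ≤ row.length)
instance (grid : List (List String)) : Decidable (Pre_countEnclosedWaterBodies grid) := by
  unfold Pre_countEnclosedWaterBodies; infer_instance

def pvWitness_countEnclosedWaterBodies : List (List String) :=
  [["1", "1", "1"], ["1", "0", "1"], ["1", "1", "0"]]

def Spec_countEnclosedWaterBodies (grid : List (List String)) (out : Int) : Prop := out = countEnclosedWaterBodies_alt grid
instance (grid : List (List String)) (out : Int) : Decidable (Spec_countEnclosedWaterBodies grid out) := by unfold Spec_countEnclosedWaterBodies; infer_instance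

-- ===== CLAIM (what is proved, stated in full; the proofs are below) =====
def Claim_equal_countEnclosedWaterBodies : Prop := ∀ (grid : List (List String)), Dom_countEnclosedWaterBodies grid → Pre_countEnclosedWaterBodies grid → Spec_countEnclosedWaterBodies grid (countEnclosedWaterBodies grid)

-- ===== LEMMAS AND PROOFS =====

-- number of cells equal to t, the termination measure of the flood fill
def pvCnt (t : String) (g : List (List String)) : Nat :=
  (g.map (fun row => row.count t)).sum

-- the invariant: n rows, every row at least m wide
def pvShape (n m : Nat) (g : List (List String)) : Prop :=
  g.length = n ∧ ∀ row ∈ g, m ≤ row.length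

theorem count_set_of_get (row : List String) (i : Nat) (v t : String)
    (hi : i < row.length) (ht : row.getD i "" = t) (hv : v ≠ t) :
    (row.set i v).count t + 1 = row.count t := by
  induction row generalizing i with
  | nil => simp at hi
  | cons a tl ih =>
    cases i with
    | zero =>
      simp only [List.getD_cons_zero] at ht
      simp [List.set, ht, hv]
    | succ i =>
      simp only [List.getD_cons_succ] at ht
      simp only [List.length_cons, Nat.add_lt_add_iff_right] at hi
      simp only [List.set, List.count_cons]
      have := ih i hi ht
      omega

theorem pvCnt_set (g : List (List String)) (r c : Nat) (v t : String)
    (hr : r < g.length) (hc : c < (g.getD r []).length)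
    (ht : pvCell g r c = t) (hv : v ≠ t) :
    pvCnt t (pvSet g r c v) + 1 = pvCnt t g := by
  induction g generalizing r with
  | nil => simp at hr
  | cons a tl ih =>
    cases r with
    | zero =>
      simp only [List.getD_cons_zero] at hc
      simp only [pvCell, List.getD_cons_zero] at ht
      simp only [pvSet, List.getD_cons_zero, List.set, pvCnt, List.map_cons, List.sum_cons]
      have := count_set_of_get a c v t hc ht hv
      omega
    | succ r =>
      simp only [List.length_cons, Nat.add_lt_add_iff_right] at hr
      simp only [List.getD_cons_succ] at hc
      simp only [pvCell, List.getD_cons_succ] at ht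
      simp only [pvSet, List.getD_cons_succ, List.set, pvCnt, List.map_cons, List.sum_cons]
      have := ih r hr hc ht
      simp only [pvSet, pvCnt] at this
      omega

theorem pvCnt_le_tot (t : String) (g : List (List String)) : pvCnt t g ≤ pvTot g := by
  induction g with
  | nil => simp [pvCnt, pvTot]
  | cons a tl ih =>
    simp only [pvCnt, pvTot, List.map_cons, List.sum_cons] at *
    have := List.count_le_length (a := t) (l := a)
    omega

theorem pvShape_set (n m : Nat) (g : List (List String)) (r c : Nat) (v : String)
    (hs : pvShape n m g) : pvShape n m (pvSet g r c v) := by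
  obtain ⟨h1, h2⟩ := hs
  by_cases hr : r < g.length
  · refine ⟨by simp [pvSet, h1], ?_⟩
    intro row hrow
    rcases List.mem_or_eq_of_mem_set hrow with h | h
    · exact h2 row h
    · subst h
      rw [List.length_set]
      have : g.getD r [] ∈ g := by
        rw [List.getD_eq_getElem g [] hr]
        exact List.getElem_mem hr
      exact h2 _ this
  · rw [pvSet, List.set_eq_of_length_le (by omega)]
    exact ⟨h1, h2⟩

theorem shape_row_len (n m : Nat) (g : List (List String)) (r : Nat)
    (hs : pvShape n m g) (hr : r < g.length) : m ≤ (g.getD r []).length := by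
  have : g.getD r [] ∈ g := by
    rw [List.getD_eq_getElem g [] hr]
    exact List.getElem_mem hr
  exact hs.2 _ this

theorem dfsA_inv (n m : Nat) (t mk : String) (hmk : mk ≠ t) :
    ∀ (f : Nat) (g : List (List String)) (r c : Int), pvShape n m g →
      pvShape n m (dfsA n m t mk f g r c) ∧ pvCnt t (dfsA n m t mk f g r c) ≤ pvCnt t g := by
  intro f
  induction f with
  | zero => intro g r c hs; exact ⟨hs, le_refl _⟩
  | succ f ih =>
    intro g r c hs
    rw [dfsA]
    split
    · exact ⟨hs, le_refl _⟩
    · rename_i h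
      push_neg at h
      obtain ⟨h1, h2, h3, h4, h5⟩ := h
      have hlen := hs.1
      have hrn : r.toNat < g.length := by omega
      have hcn : c.toNat < (g.getD r.toNat []).length := by
        have := shape_row_len n m g r.toNat hs hrn
        omega
      have hset := pvCnt_set g r.toNat c.toNat mk t hrn hcn h5 hmk
      have hs1 := pvShape_set n m g r.toNat c.toNat mk hs
      obtain ⟨sa, ca⟩ := ih _ (r+1) c hs1
      obtain ⟨sb, cb⟩ := ih _ (r-1) c sa
      obtain ⟨sc, cc⟩ := ih _ r (c+1) sb
      obtain ⟨sd, cd⟩ := ih _ r (c-1) sc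
      exact ⟨sd, by omega⟩

theorem dfsA_fuel (n m : Nat) (t mk : String) (hmk : mk ≠ t) :
    ∀ (k : Nat) (g : List (List String)) (r c : Int) (f1 f2 : Nat), pvShape n m g →
      pvCnt t g ≤ k → k < f1 → k < f2 →
      dfsA n m t mk f1 g r c = dfsA n m t mk f2 g r c := by
  intro k
  induction k with
  | zero =>
    intro g r c f1 f2 hs hcnt hf1 hf2
    cases f1 with
    | zero => omega
    | succ f1 =>
      cases f2 with
      | zero => omega
      | succ f2 =>
        rw [dfsA, dfsA]
        split
        · rfl
        · rename_i h
          push_neg at h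
          obtain ⟨h1, h2, h3, h4, h5⟩ := h
          have hlen := hs.1
          have hrn : r.toNat < g.length := by omega
          have hcn : c.toNat < (g.getD r.toNat []).length := by
            have := shape_row_len n m g r.toNat hs hrn
            omega
          have hset := pvCnt_set g r.toNat c.toNat mk t hrn hcn h5 hmk
          omega
  | succ k ih =>
    intro g r c f1 f2 hs hcnt hf1 hf2
    cases f1 with
    | zero => omega
    | succ f1 =>
      cases f2 with
      | zero => omega
      | succ f2 =>
        rw [dfsA, dfsA]
        split
        · rfl
        · rename_i h
          push_neg at h
          obtain ⟨h1, h2, h3, h4, h5⟩ := h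
          have hlen := hs.1
          have hrn : r.toNat < g.length := by omega
          have hcn : c.toNat < (g.getD r.toNat []).length := by
            have := shape_row_len n m g r.toNat hs hrn
            omega
          have hset := pvCnt_set g r.toNat c.toNat mk t hrn hcn h5 hmk
          have hs1 := pvShape_set n m g r.toNat c.toNat mk hs
          have e1 : dfsA n m t mk f1 (pvSet g r.toNat c.toNat mk) (r+1) c
                  = dfsA n m t mk f2 (pvSet g r.toNat c.toNat mk) (r+1) c :=
            ih _ (r+1) c f1 f2 hs1 (by omega) (by omega) (by omega)
          rw [e1]
          obtain ⟨hs2, hc2⟩ := dfsA_inv n m t mk hmk f2 (pvSet g r.toNat c.toNat mk) (r+1) c hs1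
          have e2 : dfsA n m t mk f1 (dfsA n m t mk f2 (pvSet g r.toNat c.toNat mk) (r+1) c) (r-1) c
                  = dfsA n m t mk f2 (dfsA n m t mk f2 (pvSet g r.toNat c.toNat mk) (r+1) c) (r-1) c :=
            ih _ (r-1) c f1 f2 hs2 (by omega) (by omega) (by omega)
          rw [e2]
          obtain ⟨hs3, hc3⟩ := dfsA_inv n m t mk hmk f2 _ (r-1) c hs2
          have e3 : dfsA n m t mk f1 (dfsA n m t mk f2 (dfsA n m t mk f2 (pvSet g r.toNat c.toNat mk) (r+1) c) (r-1) c) r (c+1)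
                  = dfsA n m t mk f2 (dfsA n m t mk f2 (dfsA n m t mk f2 (pvSet g r.toNat c.toNat mk) (r+1) c) (r-1) c) r (c+1) :=
            ih _ r (c+1) f1 f2 hs3 (by omega) (by omega) (by omega)
          rw [e3]
          obtain ⟨hs4, hc4⟩ := dfsA_inv n m t mk hmk f2 _ r (c+1) hs3
          exact ih _ r (c-1) f1 f2 hs4 (by omega) (by omega) (by omega)

theorem stack_sim (n m : Nat) (t mk : String) (hmk : mk ≠ t) :
    ∀ (f : Nat) (g : List (List String)) (st : List (Int × Int)), pvShape n m g →
      4 * pvCnt t g + st.length < f →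
      stackLoop n m t mk f g st =
        st.foldl (fun g p => dfsA n m t mk (pvCnt t g + 1) g p.1 p.2) g := by
  intro f
  induction f with
  | zero => intro g st hs hlt; omega
  | succ f ih =>
    intro g st hs hlt
    cases st with
    | nil => rfl
    | cons p rest =>
      obtain ⟨r, c⟩ := p
      rw [stackLoop]
      simp only [List.foldl_cons]
      by_cases hcond : (r < 0 ∨ c < 0 ∨ (n : Int) ≤ r ∨ (m : Int) ≤ c ∨ pvCell g r.toNat c.toNat ≠ t)
      · rw [if_pos hcond]
        have hbase : dfsA n m t mk (pvCnt t g + 1) g r c = g := by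
          rw [dfsA, if_pos hcond]
        rw [hbase]
        simp only [List.length_cons] at hlt
        exact ih g rest hs (by omega)
      · rw [if_neg hcond]
        push_neg at hcond
        obtain ⟨h1, h2, h3, h4, h5⟩ := hcond
        have hlen := hs.1
        have hrn : r.toNat < g.length := by omega
        have hcn : c.toNat < (g.getD r.toNat []).length := by
          have := shape_row_len n m g r.toNat hs hrn
          omega
        have hset := pvCnt_set g r.toNat c.toNat mk t hrn hcn h5 hmk
        have hs1 := pvShape_set n m g r.toNat c.toNat mk hs
        simp only [List.length_cons] at hlt
        rw [ih (pvSet g r.toNat c.toNat mk) ((r+1, c) :: (r-1, c) :: (r, c+1) :: (r, c-1) :: rest) hs1 (by simp only [List.length_cons]; omega)]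
        simp only [List.foldl_cons]
        -- peel the four neighbour steps and align their fuels with dfsA's unfolding
        have hd : dfsA n m t mk (pvCnt t g + 1) g r c
            = dfsA n m t mk (pvCnt t g)
                (dfsA n m t mk (pvCnt t g)
                  (dfsA n m t mk (pvCnt t g)
                    (dfsA n m t mk (pvCnt t g) (pvSet g r.toNat c.toNat mk) (r+1) c)
                    (r-1) c)
                  r (c+1))
                r (c-1) := by
          conv_lhs => rw [show pvCnt t g + 1 = (pvCnt t g) + 1 from rfl, dfsA]
          rw [if_neg (by push_neg; exact ⟨h1, h2, h3, h4, h5⟩)]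
        have e1 : dfsA n m t mk (pvCnt t (pvSet g r.toNat c.toNat mk) + 1) (pvSet g r.toNat c.toNat mk) (r+1) c
                = dfsA n m t mk (pvCnt t g) (pvSet g r.toNat c.toNat mk) (r+1) c :=
          dfsA_fuel n m t mk hmk (pvCnt t (pvSet g r.toNat c.toNat mk)) _ (r+1) c _ _ hs1 (le_refl _) (by omega) (by omega)
        rw [e1]
        obtain ⟨hs2, hc2⟩ := dfsA_inv n m t mk hmk (pvCnt t g) (pvSet g r.toNat c.toNat mk) (r+1) c hs1
        have e2 : dfsA n m t mk (pvCnt t (dfsA n m t mk (pvCnt t g) (pvSet g r.toNat c.toNat mk) (r+1) c) + 1) (dfsA n m t mk (pvCnt t g) (pvSet g r.toNat c.toNat mk) (r+1) c) (r-1) c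
                = dfsA n m t mk (pvCnt t g) (dfsA n m t mk (pvCnt t g) (pvSet g r.toNat c.toNat mk) (r+1) c) (r-1) c :=
          dfsA_fuel n m t mk hmk _ _ (r-1) c _ _ hs2 (le_refl _) (by omega) (by omega)
        rw [e2]
        obtain ⟨hs3, hc3⟩ := dfsA_inv n m t mk hmk (pvCnt t g) _ (r-1) c hs2
        have e3 := dfsA_fuel n m t mk hmk (pvCnt t (dfsA n m t mk (pvCnt t g) (dfsA n m t mk (pvCnt t g) (pvSet g r.toNat c.toNat mk) (r+1) c) (r-1) c)) _ r (c+1) (pvCnt t (dfsA n m t mk (pvCnt t g) (dfsA n m t mk (pvCnt t g) (pvSet g r.toNat c.toNat mk) (r+1) c) (r-1) c) + 1) (pvCnt t g) hs3 (le_refl _) (by omega) (by omega)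
        rw [e3]
        obtain ⟨hs4, hc4⟩ := dfsA_inv n m t mk hmk (pvCnt t g) _ r (c+1) hs3
        have e4 := dfsA_fuel n m t mk hmk (pvCnt t (dfsA n m t mk (pvCnt t g) (dfsA n m t mk (pvCnt t g) (dfsA n m t mk (pvCnt t g) (pvSet g r.toNat c.toNat mk) (r+1) c) (r-1) c) r (c+1))) _ r (c-1) (pvCnt t (dfsA n m t mk (pvCnt t g) (dfsA n m t mk (pvCnt t g) (dfsA n m t mk (pvCnt t g) (pvSet g r.toNat c.toNat mk) (r+1) c) (r-1) c) r (c+1)) + 1) (pvCnt t g) hs4 (le_refl _) (by omega) (by omega)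
        rw [e4, ← hd]

theorem flood_eq (n m : Nat) (t mk : String) (hmk : mk ≠ t)
    (g : List (List String)) (r c : Int) (hs : pvShape n m g) :
    floodB n m g r c t mk = dfsTop n m g r c t mk := by
  have hle := pvCnt_le_tot t g
  have h1 : floodB n m g r c t mk = dfsA n m t mk (pvCnt t g + 1) g r c := by
    rw [floodB, stack_sim n m t mk hmk _ g [(r, c)] hs (by simp only [List.length_cons, List.length_nil]; omega)]
    rfl
  rw [h1, dfsTop]
  exact dfsA_fuel n m t mk hmk (pvCnt t g) g r c _ _ hs (le_refl _) (by omega) (by omega)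

theorem dfsTop_shape (n m : Nat) (t mk : String) (hmk : mk ≠ t)
    (g : List (List String)) (r c : Int) (hs : pvShape n m g) :
    pvShape n m (dfsTop n m g r c t mk) := by
  exact (dfsA_inv n m t mk hmk (pvTot g + 1) g r c hs).1

theorem foldl_inv {α σ : Type} (P : σ → Prop) (f : σ → α → σ)
    (h : ∀ s a, P s → P (f s a)) :
    ∀ (l : List α) (s : σ), P s → P (l.foldl f s) := by
  intro l
  induction l with
  | nil => intro s hs; simpa using hs
  | cons a tl ih => intro s hs; simpa using ih (f s a) (h s a hs)

theorem foldl_congr_inv {α σ : Type} (P : σ → Prop) (f f' : σ → α → σ)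
    (hfe : ∀ s a, P s → f s a = f' s a) (hp : ∀ s a, P s → P (f s a)) :
    ∀ (l : List α) (s : σ), P s → l.foldl f s = l.foldl f' s := by
  intro l
  induction l with
  | nil => intro s _; rfl
  | cons a tl ih =>
    intro s hs
    simp only [List.foldl_cons]
    rw [← hfe s a hs]
    exact ih (f s a) (hp s a hs)

theorem foldl_flatMap' {α β σ : Type} (h : α → List β) (f : σ → β → σ) :
    ∀ (l : List α) (s : σ), (l.flatMap h).foldl f s = l.foldl (fun s a => (h a).foldl f s) s := by
  intro l
  induction l with
  | nil => intro s; rfl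
  | cons a tl ih =>
    intro s
    simp only [List.flatMap_cons, List.foldl_append, List.foldl_cons]
    exact ih _

-- proof-side names for A's three loop bodies and the dfsTop forms of B's steps
def aStep1 (n m : Nat) (g : List (List String)) (i : Nat) : List (List String) :=
  let ga := if pvCell g i 0 = "0" then dfsTop n m g (i : Int) 0 "0" "#" else g
  if pvCell ga i (m - 1) = "0" then dfsTop n m ga (i : Int) ((m : Int) - 1) "0" "#" else ga

def aStep2 (n m : Nat) (g : List (List String)) (j : Nat) : List (List String) :=
  let ga := if pvCell g 0 j = "0" then dfsTop n m g 0 (j : Int) "0" "#" else g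
  if pvCell ga (n - 1) j = "0" then dfsTop n m ga ((n : Int) - 1) (j : Int) "0" "#" else ga

def aStep3 (n m : Nat) (s : Int × List (List String)) (i : Nat) : Int × List (List String) :=
  List.foldl (fun s j => if pvCell s.2 i j = "0" then (s.1 + 1, dfsTop n m s.2 (i : Int) (j : Int) "0" "W") else s) s (List.range m)

def aStepP (n m : Nat) (mk : String) (g : List (List String)) (p : Nat × Nat) : List (List String) :=
  if pvCell g p.1 p.2 = "0" then dfsTop n m g (p.1 : Int) (p.2 : Int) "0" mk else g

def aStepQ (n m : Nat) (s : Int × List (List String)) (q : Nat × Nat) : Int × List (List String) :=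
  if pvCell s.2 q.1 q.2 = "0" then (s.1 + 1, dfsTop n m s.2 (q.1 : Int) (q.2 : Int) "0" "W") else s

theorem bfloodP_eq (n m : Nat) (mk : String) (hmk : mk ≠ "0") (g : List (List String))
    (p : Nat × Nat) (hs : pvShape n m g) :
    (if pvCell g p.1 p.2 = "0" then floodB n m g (p.1 : Int) (p.2 : Int) "0" mk else g)
      = aStepP n m mk g p := by
  rw [aStepP]
  split
  · exact flood_eq n m "0" mk hmk g _ _ hs
  · rfl

theorem aStepP_shape (n m : Nat) (mk : String) (hmk : mk ≠ "0") (g : List (List String))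
    (p : Nat × Nat) (hs : pvShape n m g) : pvShape n m (aStepP n m mk g p) := by
  rw [aStepP]
  split
  · exact dfsTop_shape n m "0" mk hmk g _ _ hs
  · exact hs

theorem aStep1_eq (n m : Nat) (hm0 : 0 < m) (g : List (List String)) (i : Nat) :
    aStepP n m "#" (aStepP n m "#" g (i, 0)) (i, m - 1) = aStep1 n m g i := by
  have hmc : ((m - 1 : Nat) : Int) = (m : Int) - 1 := by omega
  simp only [aStepP, aStep1, Nat.cast_zero, hmc]

theorem aStep2_eq (n m : Nat) (hn0 : 0 < n) (g : List (List String)) (j : Nat) :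
    aStepP n m "#" (aStepP n m "#" g (0, j)) (n - 1, j) = aStep2 n m g j := by
  have hnc : ((n - 1 : Nat) : Int) = (n : Int) - 1 := by omega
  simp only [aStepP, aStep2, Nat.cast_zero, hnc]

theorem aStep1_shape (n m : Nat) (hm0 : 0 < m) (g : List (List String)) (i : Nat)
    (hs : pvShape n m g) : pvShape n m (aStep1 n m g i) := by
  rw [← aStep1_eq n m hm0]
  exact aStepP_shape n m "#" (by decide) _ _ (aStepP_shape n m "#" (by decide) g (i, 0) hs)

theorem aStep2_shape (n m : Nat) (hn0 : 0 < n) (g : List (List String)) (j : Nat)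
    (hs : pvShape n m g) : pvShape n m (aStep2 n m g j) := by
  rw [← aStep2_eq n m hn0]
  exact aStepP_shape n m "#" (by decide) _ _ (aStepP_shape n m "#" (by decide) g (0, j) hs)

theorem bfloodQ_eq (n m : Nat) (s : Int × List (List String)) (q : Nat × Nat)
    (hs : pvShape n m s.2) :
    (if pvCell s.2 q.1 q.2 = "0" then (s.1 + 1, floodB n m s.2 (q.1 : Int) (q.2 : Int) "0" "W") else s)
      = aStepQ n m s q := by
  rw [aStepQ]
  split
  · rw [flood_eq n m "0" "W" (by decide) s.2 _ _ hs]
  · rfl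

theorem aStepQ_shape (n m : Nat) (s : Int × List (List String)) (q : Nat × Nat)
    (hs : pvShape n m s.2) : pvShape n m (aStepQ n m s q).2 := by
  rw [aStepQ]
  split
  · exact dfsTop_shape n m "0" "W" (by decide) s.2 _ _ hs
  · exact hs

theorem phase_eq (grid : List (List String)) (n m : Nat)
    (hn0 : 0 < n) (hm0 : 0 < m) (hshape : pvShape n m grid) :
    (List.foldl
        (fun (s : Int × List (List String)) (q : Nat × Nat) =>
          if pvCell s.2 q.1 q.2 = "0" then (s.1 + 1, floodB n m s.2 (q.1 : Int) (q.2 : Int) "0" "W") else s)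
        (0, List.foldl
              (fun (g : List (List String)) (p : Nat × Nat) =>
                if pvCell g p.1 p.2 = "0" then floodB n m g (p.1 : Int) (p.2 : Int) "0" "#" else g)
              grid
              ((List.range n).flatMap (fun i => [(i, 0), (i, m - 1)]) ++
               (List.range m).flatMap (fun j => [(0, j), (n - 1, j)])))
        ((List.range n).flatMap (fun i => (List.range m).map (fun j => (i, j))))).1
    =
    (List.foldl (aStep3 n m)
        ((0 : Int), List.foldl (aStep2 n m) (List.foldl (aStep1 n m) grid (List.range n)) (List.range m))
        (List.range n)).1 := by
  rw [foldl_congr_inv (pvShape n m) _ (aStepP n m "#")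
        (fun s a hp => bfloodP_eq n m "#" (by decide) s a hp)
        (fun s a hp => by
          rw [bfloodP_eq n m "#" (by decide) s a hp]
          exact aStepP_shape n m "#" (by decide) s a hp)
        _ grid hshape]
  rw [List.foldl_append]
  rw [foldl_flatMap' (fun i => [(i, 0), (i, m - 1)]) (aStepP n m "#") (List.range n) grid]
  have e1 : (fun (g : List (List String)) (i : Nat) => List.foldl (aStepP n m "#") g [(i, 0), (i, m - 1)])
      = aStep1 n m := by
    funext g i
    simp only [List.foldl_cons, List.foldl_nil]
    exact aStep1_eq n m hm0 g i
  rw [e1]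
  rw [foldl_flatMap' (fun j => [(0, j), (n - 1, j)]) (aStepP n m "#") (List.range m) _]
  have e2 : (fun (g : List (List String)) (j : Nat) => List.foldl (aStepP n m "#") g [(0, j), (n - 1, j)])
      = aStep2 n m := by
    funext g j
    simp only [List.foldl_cons, List.foldl_nil]
    exact aStep2_eq n m hn0 g j
  rw [e2]
  have hshape2 : pvShape n m (List.foldl (aStep2 n m) (List.foldl (aStep1 n m) grid (List.range n)) (List.range m)) :=
    foldl_inv (pvShape n m) (aStep2 n m) (fun s a hp => aStep2_shape n m hn0 s a hp) _ _
      (foldl_inv (pvShape n m) (aStep1 n m) (fun s a hp => aStep1_shape n m hm0 s a hp) _ _ hshape)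
  rw [foldl_congr_inv (fun s : Int × List (List String) => pvShape n m s.2) _ (aStepQ n m)
        (fun s a hp => bfloodQ_eq n m s a hp)
        (fun s a hp => by
          rw [bfloodQ_eq n m s a hp]
          exact aStepQ_shape n m s a hp)
        _ _ hshape2]
  rw [foldl_flatMap' (fun i => (List.range m).map (fun j => (i, j))) (aStepQ n m) (List.range n) _]
  have e3 : (fun (s : Int × List (List String)) (i : Nat) =>
        List.foldl (aStepQ n m) s ((List.range m).map (fun j => (i, j)))) = aStep3 n m := by
    funext s i
    rw [List.foldl_map]
    rfl
  rw [e3]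

-- ===== VERDICT (by name: the statement is the Claim_ definition above) =====
theorem countEnclosedWaterBodies_spec : Claim_equal_countEnclosedWaterBodies := by
  intro grid hdom hpre
  unfold Spec_countEnclosedWaterBodies
  by_cases hnil : grid = []
  · simp [countEnclosedWaterBodies, countEnclosedWaterBodies_alt, hnil]
  · rcases hpre with h | ⟨hm, hrows⟩
    · exact absurd h hnil
    rw [countEnclosedWaterBodies, countEnclosedWaterBodies_alt, if_neg hnil, if_neg hnil]
    have hn0 : 0 < grid.length := List.length_pos_iff.mpr hnil
    exact (phase_eq grid grid.length (grid.headD []).length hn0 hm ⟨rfl, hrows⟩).symm
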